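-- pv_equiv track=rewrite | github.com/katya342/python | SQ_game/cardsgame.py | get_cards_without_pairs
-- ===== SOURCE A (Python) =====
-- def get_cards_without_pairs(cards):
--     temp_cards_values = get_cards_value(cards)
--     last = []
--     for card in cards:
--         if temp_cards_values[card[0]] % 2 != 0:
--             last.append(card)
--             temp_cards_values[card[0]] -= 1
--     return last
--
-- def get_cards_value(cards):
--     cards_by_value = {}
--     for card in cards:
--         if card[0] not in cards_by_value:
--             cards_by_value[card[0]] = 1      # 9 : 1
--         else:
--             cards_by_value[card[0]] += 1     # 9 : 2
--
--     return cards_by_value                      # Returns dictionary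
-- ===== SOURCE B (Python) =====
-- def get_cards_without_pairs(cards):
--     if not cards:
--         return []
--     head = cards[0]
--     v = head[0]
--     same = [c for c in cards if c[0] == v]
--     rest = [c for c in cards[1:] if c[0] != v]
--     return ([head] if len(same) % 2 == 1 else []) + get_cards_without_pairs(rest)
-- ===== Notes on version B (the rewrite author's own statement) =====
-- stated objective: alternative
-- what changed: Replaces A's two dict passes (build a count dict, then rescan all cards decrementing counters) by a dict-free recursion that peels off one value group at a time: keep the head iff its value's total count is odd, recurse on the cards of other values.
import Mathlib
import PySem

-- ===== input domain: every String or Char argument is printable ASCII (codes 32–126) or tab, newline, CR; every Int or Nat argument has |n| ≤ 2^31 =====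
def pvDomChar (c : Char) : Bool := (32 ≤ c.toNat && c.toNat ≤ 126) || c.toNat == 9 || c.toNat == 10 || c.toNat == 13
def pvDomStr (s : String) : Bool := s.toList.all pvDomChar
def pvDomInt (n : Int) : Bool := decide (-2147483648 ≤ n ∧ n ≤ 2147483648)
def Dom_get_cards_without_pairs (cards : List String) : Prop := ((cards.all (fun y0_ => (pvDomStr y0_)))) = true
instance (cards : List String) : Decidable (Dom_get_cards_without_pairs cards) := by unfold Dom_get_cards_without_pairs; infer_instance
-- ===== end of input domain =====

-- B replaces A's two dict passes (count dict, then a scan-with-decrement over all cards) by a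
-- dict-free recursion that peels off one value group at a time (objective: alternative).

-- card[0]: exact for nonempty strings (Pre_ excludes ""; Python raises IndexError there)
def pvHd (s : String) : Char := (PySem.Str.pyGet? s 0).getD ' '

-- ===== PORT A =====
def get_cards_value (cards : List String) : PySem.Dict Char Int :=
  cards.foldl (fun d card =>
    if d.contains (pvHd card) = false then d.insert (pvHd card) 1
    else d.modify (pvHd card) 0 (· + 1)) PySem.Dict.empty

def get_cards_without_pairs (cards : List String) : List String :=
  let temp := get_cards_value cards
  (cards.foldl (fun st card =>
      if PySem.Int.mod (st.1.getD (pvHd card) 0) 2 ≠ 0 then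
        (st.1.modify (pvHd card) 0 (· - 1), st.2 ++ [card])
      else st)
    ((temp, ([] : List String)) : PySem.Dict Char Int × List String)).2

-- ===== PORT B =====
-- fuel = cards.length is a pure totality guard: each recursive call's list is strictly shorter
def get_cards_without_pairs_rec : Nat → List String → List String
  | _, [] => []
  | 0, _ :: _ => []
  | fuel + 1, head :: tl =>
    let v := pvHd head
    let same := (head :: tl).filter (fun c => pvHd c = v)
    let rest := tl.filter (fun c => pvHd c ≠ v)
    (if PySem.Int.mod (same.length : Int) 2 = 1 then [head] else [])
      ++ get_cards_without_pairs_rec fuel rest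

def get_cards_without_pairs_alt (cards : List String) : List String :=
  get_cards_without_pairs_rec cards.length cards

-- ===== PRECONDITION & SPEC =====
-- Pre_ excludes lists containing an empty string: there card[0] raises IndexError in A (and in B).
def Pre_get_cards_without_pairs (cards : List String) : Prop := ∀ s ∈ cards, s ≠ ""
instance (cards : List String) : Decidable (Pre_get_cards_without_pairs cards) := by unfold Pre_get_cards_without_pairs; infer_instance
def pvWitness_get_cards_without_pairs : List String := ["7h", "7d", "9s"]

def Spec_get_cards_without_pairs (cards : List String) (out : List String) : Prop := out = get_cards_without_pairs_alt cards
instance (cards : List String) (out : List String) : Decidable (Spec_get_cards_without_pairs cards out) := by unfold Spec_get_cards_without_pairs; infer_instance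

-- ===== CLAIM (what is proved, stated in full; the proofs are below) =====
def Claim_equal_get_cards_without_pairs : Prop := ∀ (cards : List String), Dom_get_cards_without_pairs cards → Pre_get_cards_without_pairs cards → Spec_get_cards_without_pairs cards (get_cards_without_pairs cards)

-- ===== LEMMAS AND PROOFS =====

-- total number of cards of value v (as A's counter dict ends up holding)
def totC (cards : List String) (v : Char) : Int := ((cards.map pvHd).count v : Int)

-- canonical result w.r.t. an abstract total count `tot`:
-- first occurrence of each not-yet-seen value, kept iff its total count is odd
def specF (tot : Char → Int) : List Char → List String → List String
  | _, [] => []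
  | seen, c :: rs =>
    if pvHd c ∈ seen then specF tot seen rs
    else if PySem.Int.mod (tot (pvHd c)) 2 ≠ 0
      then c :: specF tot (pvHd c :: seen) rs
      else specF tot (pvHd c :: seen) rs

theorem countsA_getD (l : List String) (d : PySem.Dict Char Int) (v : Char) :
    (l.foldl (fun d card =>
        if d.contains (pvHd card) = false then d.insert (pvHd card) 1
        else d.modify (pvHd card) 0 (· + 1)) d).getD v 0
      = d.getD v 0 + ((l.map pvHd).count v : Int) := by
  induction l generalizing d with
  | nil => simp
  | cons c rs ih =>
    simp only [List.foldl_cons, ih, List.map_cons, List.count_cons]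
    by_cases hc : d.contains (pvHd c) = false
    · rw [if_pos hc, PySem.Dict.getD_insert]
      by_cases hv : v = pvHd c
      · subst hv
        rw [PySem.Dict.getD_of_not_contains _ _ hc]
        simp
        omega
      · rw [if_neg hv]
        have : (pvHd c == v) = false := by simp [beq_eq_false_iff_ne]; exact fun h => hv h.symm
        simp [this]
    · rw [if_neg hc, PySem.Dict.getD_modify]
      by_cases hv : v = pvHd c
      · subst hv; simp; ring
      · rw [if_neg hv]
        have : (pvHd c == v) = false := by simp [beq_eq_false_iff_ne]; exact fun h => hv h.symm
        simp [this]

theorem loopA_spec (cards : List String) (rest : List String) (d : PySem.Dict Char Int)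
    (acc : List String) (seen : List Char)
    (hInv : ∀ v, v ∈ rest.map pvHd →
      d.getD v 0 = if v ∈ seen ∧ PySem.Int.mod (totC cards v) 2 ≠ 0
        then totC cards v - 1 else totC cards v) :
    (rest.foldl (fun st card =>
        if PySem.Int.mod (st.1.getD (pvHd card) 0) 2 ≠ 0 then
          (st.1.modify (pvHd card) 0 (· - 1), st.2 ++ [card])
        else st) ((d, acc) : PySem.Dict Char Int × List String)).2
      = acc ++ specF (totC cards) seen rest := by
  induction rest generalizing d acc seen with
  | nil => simp [specF]
  | cons c rs ih =>
    have hv := hInv (pvHd c) (by simp)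
    have hmod2 : PySem.Int.mod (totC cards (pvHd c)) 2 = totC cards (pvHd c) % 2 :=
      PySem.Int.mod_eq_emod_of_pos (by norm_num)
    have hInv' : ∀ v, v ∈ rs.map pvHd →
        d.getD v 0 = if v ∈ seen ∧ PySem.Int.mod (totC cards v) 2 ≠ 0
          then totC cards v - 1 else totC cards v :=
      fun w hw => hInv w (by simp at hw ⊢; tauto)
    simp only [List.foldl_cons, specF]
    by_cases hm : pvHd c ∈ seen
    · rw [if_pos hm]
      by_cases hodd : PySem.Int.mod (totC cards (pvHd c)) 2 ≠ 0
      · -- d[v] = tot - 1, which is even: skip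
        rw [if_pos ⟨hm, hodd⟩] at hv
        have heven : ¬ PySem.Int.mod (totC cards (pvHd c) - 1) 2 ≠ 0 := by
          have h1 : PySem.Int.mod (totC cards (pvHd c) - 1) 2
              = (totC cards (pvHd c) - 1) % 2 := PySem.Int.mod_eq_emod_of_pos (by norm_num)
          rw [hmod2] at hodd
          omega
        rw [hv, if_neg heven]
        exact ih d acc seen hInv'
      · rw [if_neg (by tauto)] at hv
        rw [hv, if_neg hodd]
        exact ih d acc seen hInv'
    · rw [if_neg hm]
      rw [if_neg (by tauto)] at hv
      rw [hv]
      by_cases hodd : PySem.Int.mod (totC cards (pvHd c)) 2 ≠ 0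
      · rw [if_pos hodd, if_pos hodd]
        rw [ih (d.modify (pvHd c) 0 (· - 1)) (acc ++ [c]) (pvHd c :: seen) (by
          intro w hw
          rw [PySem.Dict.getD_modify]
          by_cases hwv : w = pvHd c
          · subst hwv
            rw [if_pos rfl, hv, if_pos ⟨List.mem_cons_self, hodd⟩]
          · rw [if_neg hwv, hInv' w hw]
            simp [List.mem_cons, hwv])]
        simp
      · rw [if_neg hodd, if_neg hodd]
        exact ih d acc (pvHd c :: seen) (by
          intro w hw
          by_cases hwv : w = pvHd c
          · subst hwv
            rw [hv, if_neg (by tauto)]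
          · rw [hInv' w hw]
            simp [List.mem_cons, hwv])

theorem A_eq_spec (cards : List String) :
    get_cards_without_pairs cards = specF (totC cards) [] cards := by
  unfold get_cards_without_pairs
  exact loopA_spec cards cards (get_cards_value cards) [] [] (by
    intro v _
    rw [if_neg (by simp)]
    unfold get_cards_value
    rw [countsA_getD]
    simp [totC])

-- specF only reads the membership of `seen`
theorem specF_seen_congr (tot : Char → Int) (seen seen' : List Char) (rest : List String)
    (h : ∀ x, x ∈ seen ↔ x ∈ seen') :
    specF tot seen rest = specF tot seen' rest := by
  induction rest generalizing seen seen' with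
  | nil => rfl
  | cons c rs ih =>
    simp only [specF]
    by_cases hm : pvHd c ∈ seen
    · rw [if_pos hm, if_pos ((h _).mp hm)]
      exact ih seen seen' h
    · rw [if_neg hm, if_neg (fun h1 => hm ((h _).mpr h1))]
      have h' : ∀ x, x ∈ pvHd c :: seen ↔ x ∈ pvHd c :: seen' := by
        intro x; simp [List.mem_cons, h x]
      split_ifs with hodd
      · rw [ih _ _ h']
      · exact ih _ _ h'

-- marking a value as seen = filtering it out of the remaining cards
theorem specF_cons_seen (tot : Char → Int) (v : Char) (seen : List Char) (rest : List String) :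
    specF tot (v :: seen) rest
      = specF tot seen (rest.filter (fun c => pvHd c ≠ v)) := by
  induction rest generalizing seen with
  | nil => rfl
  | cons c rs ih =>
    by_cases hcv : pvHd c = v
    · have : (fun c => decide (pvHd c ≠ v)) c = false := by simp [hcv]
      simp only [specF, List.filter_cons, this, if_neg Bool.false_ne_true]
      rw [if_pos (by simp [hcv]), ih]
    · have : (fun c => decide (pvHd c ≠ v)) c = true := by simp [hcv]
      simp only [List.filter_cons, this, if_true, specF]
      by_cases hm : pvHd c ∈ seen
      · rw [if_pos (by simp [hm]), if_pos hm, ih]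
      · rw [if_neg (by simp [hcv, hm]), if_neg hm]
        have hsw : specF tot (pvHd c :: v :: seen) rs
            = specF tot (pvHd c :: seen) (rs.filter (fun c => pvHd c ≠ v)) := by
          rw [specF_seen_congr tot (pvHd c :: v :: seen) (v :: pvHd c :: seen) rs
            (by intro x; simp [List.mem_cons]; tauto), ih]
        split_ifs with hodd
        · rw [hsw]
        · exact hsw

-- specF only reads `tot` at heads of the remaining cards
theorem specF_tot_congr (tot tot' : Char → Int) (seen : List Char) (rest : List String)
    (h : ∀ c ∈ rest, tot (pvHd c) = tot' (pvHd c)) :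
    specF tot seen rest = specF tot' seen rest := by
  induction rest generalizing seen with
  | nil => rfl
  | cons c rs ih =>
    have h' : ∀ c ∈ rs, tot (pvHd c) = tot' (pvHd c) := fun x hx => h x (by simp [hx])
    simp only [specF, h c (by simp)]
    split_ifs with hm hodd
    · exact ih seen h'
    · rw [ih _ h']
    · exact ih _ h'

theorem length_filter_eq_totC (l : List String) (v : Char) :
    ((l.filter (fun c => pvHd c = v)).length : Int) = totC l v := by
  induction l with
  | nil => simp [totC]
  | cons c rs ih =>
    by_cases hcv : pvHd c = v
    · simp only [totC, List.map_cons, List.count_cons, List.filter_cons] at *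
      simp [hcv] at *
      omega
    · have hb : (v == pvHd c) = false := by simp; exact fun h => hcv h.symm
      simp only [totC, List.map_cons, List.count_cons, List.filter_cons, hb] at *
      simp [hcv] at *
      omega

theorem count_filter_ne (l : List String) (v w : Char) (hw : w ≠ v) :
    List.count w (List.map pvHd (l.filter (fun c => pvHd c ≠ v)))
      = List.count w (List.map pvHd l) := by
  induction l with
  | nil => rfl
  | cons c rs ih =>
    simp only [List.filter_cons]
    simp only [ne_eq, decide_not] at ih
    by_cases hcv : pvHd c = v
    · have h1 : ¬ (w = pvHd c) := by rw [hcv]; exact hw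
      have h2 : ¬ (pvHd c = w) := by rw [hcv]; exact fun x => hw x.symm
      rw [if_neg (by simp [hcv])]
      simp [ih, h2]
    · rw [if_pos (by simp [hcv])]
      simp [List.count_cons, ih]

theorem totC_filter_ne (tl : List String) (h : String) (v w : Char) (hw : w ≠ v)
    (hh : pvHd h = v) :
    totC (h :: tl) w = totC (tl.filter (fun c => pvHd c ≠ v)) w := by
  have hb : (pvHd h == w) = false := by
    simp only [beq_eq_false_iff_ne]; rw [hh]; exact fun x => hw x.symm
  unfold totC
  rw [count_filter_ne tl v w hw]
  simp [List.count_cons, hb]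

theorem B_eq_len : ∀ (n : Nat) (cards : List String), cards.length ≤ n →
    get_cards_without_pairs_rec n cards = specF (totC cards) [] cards := by
  intro n
  induction n with
  | zero =>
    intro cards hlen
    cases cards with
    | nil => simp [get_cards_without_pairs_rec, specF]
    | cons a b => simp at hlen
  | succ n ih =>
    intro cards hlen
    cases cards with
    | nil => simp [get_cards_without_pairs_rec, specF]
    | cons head tl =>
      simp only [get_cards_without_pairs_rec]
      simp only [specF, List.mem_nil_iff, if_neg (fun h => h)]
      have hlen2 : ((((head :: tl).filter (fun c => pvHd c = pvHd head)).length : Int))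
          = totC (head :: tl) (pvHd head) :=
        length_filter_eq_totC (head :: tl) (pvHd head)
      have hmod2 : PySem.Int.mod (totC (head :: tl) (pvHd head)) 2
          = (totC (head :: tl) (pvHd head)) % 2 :=
        PySem.Int.mod_eq_emod_of_pos (by norm_num)
      have htot0 : 0 ≤ totC (head :: tl) (pvHd head) := by unfold totC; positivity
      have hiff : (PySem.Int.mod ((((head :: tl).filter (fun c => pvHd c = pvHd head)).length : Int)) 2 = 1)
          ↔ (PySem.Int.mod (totC (head :: tl) (pvHd head)) 2 ≠ 0) := by
        rw [hlen2, hmod2]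
        constructor <;> intro h1 <;> omega
      have hrestlen : (tl.filter (fun c => pvHd c ≠ pvHd head)).length ≤ n :=
        le_trans (List.length_filter_le _ _) (by simpa using Nat.le_of_succ_le_succ hlen)
      have hrest : specF (totC (head :: tl)) [pvHd head] tl
          = specF (totC (tl.filter (fun c => pvHd c ≠ pvHd head))) []
              (tl.filter (fun c => pvHd c ≠ pvHd head)) := by
        rw [specF_cons_seen]
        refine specF_tot_congr _ _ _ _ (fun c hc => ?_)
        have hcv : pvHd c ≠ pvHd head := by
          have := List.of_mem_filter hc
          simpa using this
        exact totC_filter_ne tl head (pvHd head) (pvHd c) hcv rfl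
      by_cases hodd : PySem.Int.mod ((((head :: tl).filter (fun c => pvHd c = pvHd head)).length : Int)) 2 = 1
      · rw [if_pos hodd, if_pos (hiff.mp hodd), ih _ hrestlen, ← hrest]
        rfl
      · rw [if_neg hodd, if_neg (fun h1 => hodd (hiff.mpr h1)), ih _ hrestlen, ← hrest]
        rfl

theorem B_eq_spec (cards : List String) :
    get_cards_without_pairs_alt cards = specF (totC cards) [] cards :=
  B_eq_len cards.length cards le_rfl

-- ===== VERDICT (by name: the statement is the Claim_ definition above) =====
theorem get_cards_without_pairs_spec : Claim_equal_get_cards_without_pairs := by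
  intro cards _ _
  unfold Spec_get_cards_without_pairs
  rw [A_eq_spec, B_eq_spec]
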